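-- pv_equiv track=rewrite | github.com/stromborman/sandbox | advent_of_code/advent2020/day06.py | count
-- ===== SOURCE A (Python) =====
-- from string import ascii_lowercase
--
-- def count(lst):
--     c_any = 0
--     c_all = 0
--     for c in ascii_lowercase:
--         if any([ c in ans for ans in lst]):
--             c_any += 1
--         if all([ c in ans for ans in lst]):
--             c_all += 1
--     return c_any, c_all
-- ===== SOURCE B (Python) =====
-- from string import ascii_lowercase
--
-- def count(lst):
--     counts = {}
--     for ans in lst:
--         for ch in set(ans):
--             counts[ch] = counts.get(ch, 0) + 1
--     n = len(lst)
--     c_any = sum(1 for c in ascii_lowercase if counts.get(c, 0) >= 1)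
--     c_all = sum(1 for c in ascii_lowercase if counts.get(c, 0) == n)
--     return c_any, c_all
-- ===== Notes on version B (the rewrite author's own statement) =====
-- stated objective: faster
-- what changed: Instead of scanning the whole list twice per letter (any/all), B builds one frequency table in a single pass over the answers (each answer's distinct letters tallied once) and then derives c_any as letters with count >= 1 and c_all as letters with count == len(lst).
import Mathlib
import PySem

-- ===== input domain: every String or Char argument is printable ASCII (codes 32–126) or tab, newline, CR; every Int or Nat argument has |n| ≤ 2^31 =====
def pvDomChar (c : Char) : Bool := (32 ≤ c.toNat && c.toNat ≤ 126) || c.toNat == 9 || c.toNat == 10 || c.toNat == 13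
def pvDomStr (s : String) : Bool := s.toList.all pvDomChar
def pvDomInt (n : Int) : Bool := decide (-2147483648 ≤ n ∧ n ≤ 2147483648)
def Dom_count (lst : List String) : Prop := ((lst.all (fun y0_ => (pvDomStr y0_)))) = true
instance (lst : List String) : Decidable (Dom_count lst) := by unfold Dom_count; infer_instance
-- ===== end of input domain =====

-- B replaces A's per-letter any/all scans of the list by one frequency table built in a single
-- pass (distinct letters of each answer tallied once), then filters the 26 letters by count.

-- ===== PORT A =====
def asciiLowercase : List Char := "abcdefghijklmnopqrstuvwxyz".toList

def count (lst : List String) : Int × Int :=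
  asciiLowercase.foldl
    (fun (acc : Int × Int) c =>
      let acc1 : Int × Int :=
        if (lst.map (fun ans => ans.toList.contains c)).any id then (acc.1 + 1, acc.2) else acc
      if (lst.map (fun ans => ans.toList.contains c)).all id then (acc1.1, acc1.2 + 1) else acc1)
    (0, 0)

-- ===== PORT B =====
def count_alt (lst : List String) : Int × Int :=
  let counts : PySem.Dict Char Int :=
    lst.foldl (fun d ans =>
      (PySem.Set.ofList ans.toList).foldl (fun d ch => d.modify ch 0 (· + 1)) d)
      PySem.Dict.empty
  let n : Int := lst.length
  let c_any : Int := asciiLowercase.foldl (fun acc c => if counts.getD c 0 ≥ 1 then acc + 1 else acc) 0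
  let c_all : Int := asciiLowercase.foldl (fun acc c => if counts.getD c 0 = n then acc + 1 else acc) 0
  (c_any, c_all)

-- ===== PRECONDITION & SPEC =====
def Spec_count (lst : List String) (out : Int × Int) : Prop := out = count_alt lst
instance (lst : List String) (out : Int × Int) : Decidable (Spec_count lst out) := by unfold Spec_count; infer_instance

-- ===== CLAIM (what is proved, stated in full; the proofs are below) =====
def Claim_equal_count : Prop := ∀ (lst : List String), Dom_count lst → Spec_count lst (count lst)

-- ===== LEMMAS AND PROOFS =====

-- B's frequency table holds, for every char, the number of answers containing it.
theorem counts_getD (lst : List String) (d : PySem.Dict Char Int) (c : Char) :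
    (lst.foldl (fun d ans =>
        (PySem.Set.ofList ans.toList).foldl (fun d ch => d.modify ch 0 (· + 1)) d) d).getD c 0
      = d.getD c 0 + (lst.countP (fun ans => ans.toList.contains c) : Int) := by
  induction lst generalizing d with
  | nil => simp
  | cons ans rest ih =>
      rw [List.foldl_cons, ih, PySem.Dict.getD_foldl_modify_add_one]
      have hnd := PySem.Set.nodup_ofList (xs := ans.toList)
      by_cases h : c ∈ ans.toList
      · rw [List.count_eq_one_of_mem hnd (by simpa [PySem.Set.mem_ofList] using h)]
        simp [h]
        ring
      · rw [List.count_eq_zero.mpr (by simpa [PySem.Set.mem_ofList] using h)]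
        simp [h]

-- the per-letter agreement of the two conditions
theorem any_iff (lst : List String) (c : Char) :
    ((lst.map (fun ans => ans.toList.contains c)).any id = true)
      ↔ 1 ≤ (lst.countP (fun ans => ans.toList.contains c) : Int) := by
  simp only [List.any_map, Function.comp, List.any_eq_true, id]
  rw [show (1 : Int) ≤ (lst.countP (fun ans => ans.toList.contains c) : Int)
        ↔ 0 < lst.countP (fun ans => ans.toList.contains c) by omega]
  rw [List.countP_pos_iff]

theorem all_iff (lst : List String) (c : Char) :
    ((lst.map (fun ans => ans.toList.contains c)).all id = true)
      ↔ (lst.countP (fun ans => ans.toList.contains c) : Int) = (lst.length : Int) := by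
  simp only [List.all_map, Function.comp, List.all_eq_true, id]
  rw [Int.natCast_inj, List.countP_eq_length]

-- A's fold over any char list, compared with B's two filtering folds
theorem fold_eq (lst : List String) (cs : List Char) (a b : Int) :
    cs.foldl
      (fun (acc : Int × Int) c =>
        let acc1 : Int × Int :=
          if (lst.map (fun ans => ans.toList.contains c)).any id then (acc.1 + 1, acc.2) else acc
        if (lst.map (fun ans => ans.toList.contains c)).all id then (acc1.1, acc1.2 + 1) else acc1)
      (a, b)
    = (cs.foldl (fun acc c =>
          if 1 ≤ (lst.countP (fun ans => ans.toList.contains c) : Int) then acc + 1 else acc) a,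
       cs.foldl (fun acc c =>
          if (lst.countP (fun ans => ans.toList.contains c) : Int) = (lst.length : Int)
          then acc + 1 else acc) b) := by
  induction cs generalizing a b with
  | nil => rfl
  | cons c rest ih =>
      simp only [List.foldl_cons]
      rw [← ih]
      congr 1
      simp only [← any_iff lst c, ← all_iff lst c]
      split_ifs <;> simp_all

-- ===== VERDICT (by name: the statement is the Claim_ definition above) =====
theorem count_spec : Claim_equal_count := by
  intro lst _
  unfold Spec_count count count_alt
  rw [fold_eq lst asciiLowercase 0 0]
  simp only [counts_getD, PySem.Dict.getD_empty, zero_add, ge_iff_le]
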